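-- pv_equiv track=rewrite | github.com/zzf-damon/python | leetcode/1208. 尽可能使字符串相等.py | equalSubstring
-- ===== SOURCE A (Python) =====
-- def equalSubstring(s: str, t: str, maxCost: int) -> int:
--     a = []
--     for i in range(len(s)):
--         a.append(abs(ord(s[i]) - ord(t[i])))
--     max_length = 0
--     a_sum = 0
--     pro = 0
--     pre = 0
--     while pro < len(a):
--         if a_sum + a[pro] <= maxCost:
--             a_sum += a[pro]
--             pro += 1
--         else:
--             max_length = max(max_length, pro - pre)
--             if pre < pro:
--                 a_sum -= a[pre]
--                 pre += 1
--             else: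
--                 pre += 1
--                 pro = pre
--                 a_sum = 0
--
--     return max(max_length, pro - pre)
--
-- s = "krpgjbjjznpzdfy"
--
-- t = "nxargkbydxmsgby"
-- ===== SOURCE B (Python) =====
-- def equalSubstring(s: str, t: str, maxCost: int) -> int:
--     # Prefix sums of per-index costs; for each endpoint j, binary-search the
--     # smallest feasible start and keep the best window length.
--     P = [0]
--     for cs, ct in zip(s, t):
--         P.append(P[-1] + abs(ord(cs) - ord(ct)))
--     n = len(P) - 1
--     best = 0
--     for j in range(1, n + 1):
--         x = P[j] - maxCost
--         lo, hi = 0, j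
--         while lo < hi:
--             mid = (lo + hi) // 2
--             if P[mid] < x:
--                 lo = mid + 1
--             else:
--                 hi = mid
--         if P[j] - P[lo] <= maxCost and j - lo > best:
--             best = j - lo
--     return best
-- ===== Notes on version B (the rewrite author's own statement) =====
-- stated objective: alternative
-- what changed: Replaces the two-pointer sliding-window scan with a prefix-sum table queried, for each endpoint, by a hand-written binary search (bisect_left) for the smallest feasible start.
import Mathlib
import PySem

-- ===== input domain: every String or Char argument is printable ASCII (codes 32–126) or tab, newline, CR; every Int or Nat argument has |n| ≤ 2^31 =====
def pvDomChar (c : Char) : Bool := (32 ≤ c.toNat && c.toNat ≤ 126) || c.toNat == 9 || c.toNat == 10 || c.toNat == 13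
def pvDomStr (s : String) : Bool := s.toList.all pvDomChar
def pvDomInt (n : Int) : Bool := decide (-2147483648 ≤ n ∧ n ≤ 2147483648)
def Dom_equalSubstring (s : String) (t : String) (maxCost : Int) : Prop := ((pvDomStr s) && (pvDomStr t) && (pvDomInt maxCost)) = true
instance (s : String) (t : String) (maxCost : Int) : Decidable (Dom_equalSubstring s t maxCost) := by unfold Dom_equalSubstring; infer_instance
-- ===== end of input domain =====

-- B replaces A's two-pointer sliding window by prefix sums + per-endpoint binary search
-- (alternative algorithm, not faster); equal return values whenever len(s) <= len(t) (A raises IndexError otherwise).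


-- ===== PORT A =====
-- A's while-loop; a[pro]/a[pre] are always in range there, so List.getD is exact.
def loopA (a : List Int) (mc : Int) (ml asum : Int) (pro pre : Nat) : Int :=
  if _h : pro < a.length then
    if asum + a.getD pro 0 ≤ mc then
      loopA a mc ml (asum + a.getD pro 0) (pro + 1) pre
    else
      if pre < pro then
        loopA a mc (max ml ((pro : Int) - (pre : Int))) (asum - a.getD pre 0) pro (pre + 1)
      else
        loopA a mc (max ml ((pro : Int) - (pre : Int))) 0 (pre + 1) (pre + 1)
  else max ml ((pro : Int) - (pre : Int))
termination_by (a.length - pro) + (a.length - pre)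
decreasing_by all_goals omega

-- ord(c) is Char.toNat on the ASCII domain; the .getD ' ' is reached only outside Pre_ (IndexError in A).
def equalSubstring (s : String) (t : String) (maxCost : Int) : Int :=
  let a : List Int := (PySem.List.pyRange 0 (PySem.Str.len s) 1).foldl
    (fun acc i => acc ++ [ |((((PySem.Str.pyGet? s i).getD ' ').toNat : Int)) - ((((PySem.Str.pyGet? t i).getD ' ').toNat : Int))| ]) []
  loopA a maxCost 0 0 0 0

-- ===== PORT B =====
-- Source B's inner while-loop (bisect_left); (lo+hi)//2 on nonnegative ints is Nat division.
def blLoop (P : List Int) (x : Int) (lo hi : Nat) : Nat :=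
  if _h : lo < hi then
    if P.getD ((lo + hi) / 2) 0 < x then blLoop P x ((lo + hi) / 2 + 1) hi
    else blLoop P x lo ((lo + hi) / 2)
  else lo
termination_by hi - lo
decreasing_by all_goals omega

-- Source B's first loop: P = [0]; for cs, ct in zip(s, t): P.append(P[-1] + abs(ord(cs) - ord(ct)))
-- (P is never empty, so P[-1] is getLastD 0, exact).
def buildP (ps : List (Char × Char)) : List Int :=
  ps.foldl (fun P p => P ++ [P.getLastD 0 + |((p.1.toNat : Int)) - ((p.2.toNat : Int))|]) [0]

def equalSubstring_alt (s : String) (t : String) (maxCost : Int) : Int :=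
  let P := buildP (s.toList.zip t.toList)
  let n := P.length - 1
  (PySem.List.pyRange 1 ((n : Int) + 1) 1).foldl (fun best j =>
    let x := PySem.List.pyGetD P j 0 - maxCost
    let lo := blLoop P x 0 j.toNat
    if PySem.List.pyGetD P j 0 - P.getD lo 0 ≤ maxCost ∧ j - (lo : Int) > best then j - (lo : Int)
    else best) 0

-- ===== PRECONDITION & SPEC =====
-- Pre_ excludes exactly the inputs where A raises IndexError: t shorter than s (A reads t[i] for every i < len(s)).
def Pre_equalSubstring (s : String) (t : String) (maxCost : Int) : Prop :=
  s.toList.length ≤ t.toList.length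
instance (s : String) (t : String) (maxCost : Int) : Decidable (Pre_equalSubstring s t maxCost) := by
  unfold Pre_equalSubstring; infer_instance
def pvWitness_equalSubstring : String × String × Int := ("abcd", "acde", 3)

def Spec_equalSubstring (s : String) (t : String) (maxCost : Int) (out : Int) : Prop := out = equalSubstring_alt s t maxCost
instance (s : String) (t : String) (maxCost : Int) (out : Int) : Decidable (Spec_equalSubstring s t maxCost out) := by unfold Spec_equalSubstring; infer_instance

-- ===== CLAIM (what is proved, stated in full; the proofs are below) =====
def Claim_equal_equalSubstring : Prop := ∀ (s : String) (t : String) (maxCost : Int), Dom_equalSubstring s t maxCost → Pre_equalSubstring s t maxCost → Spec_equalSubstring s t maxCost (equalSubstring s t maxCost)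

-- ===== LEMMAS AND PROOFS =====

-- prefix sums of the cost list
def pref (c : List Int) (k : Nat) : Int := (c.take k).sum

theorem pref_succ (c : List Int) (k : Nat) : pref c (k + 1) = pref c k + c.getD k 0 := by
  unfold pref
  rw [List.take_add_one, List.sum_append]
  by_cases h : k < c.length
  · simp [List.getElem?_eq_getElem h, List.getD_eq_getElem?_getD]
  · simp [List.getElem?_eq_none (by omega : c.length ≤ k), List.getD_eq_getElem?_getD]

theorem getD_nonneg (c : List Int) (hnn : ∀ v ∈ c, 0 ≤ v) (k : Nat) : 0 ≤ c.getD k 0 := by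
  by_cases h : k < c.length
  · rw [List.getD_eq_getElem _ _ h]
    exact hnn _ (List.getElem_mem h)
  · rw [List.getD_eq_default _ _ (by omega)]

theorem pref_mono (c : List Int) (hnn : ∀ v ∈ c, 0 ≤ v) {i j : Nat} (h : i ≤ j) :
    pref c i ≤ pref c j := by
  induction j with
  | zero =>
    have : i = 0 := by omega
    rw [this]
  | succ j ih =>
    rcases Nat.lt_or_ge i (j + 1) with hlt | hge
    · have := ih (by omega)
      have hg := getD_nonneg c hnn j
      rw [pref_succ]
      omega
    · have : i = j + 1 := by omega
      rw [this]

-- characterisation of loopA: it bounds every feasible window and is itself 0 or a feasible window length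
theorem loopA_spec (a : List Int) (mc : Int) (hnn : ∀ v ∈ a, 0 ≤ v)
    (ml asum : Int) (pro pre : Nat)
    (hpp : pre ≤ pro) (hpl : pro ≤ a.length)
    (hsum : asum = pref a pro - pref a pre)
    (hfw : pre = pro ∨ pref a pro - pref a pre ≤ mc)
    (hml0 : 0 ≤ ml)
    (H1 : ∀ i j : Nat, i < pre → i ≤ j → j ≤ pro → pref a j - pref a i ≤ mc → (j : Int) - i ≤ ml)
    (H2 : ∀ i : Nat, i < pre → pro < a.length → mc < pref a (pro + 1) - pref a i)
    (Hach : ml = 0 ∨ ∃ i j : Nat, i ≤ j ∧ j ≤ a.length ∧ pref a j - pref a i ≤ mc ∧ (j : Int) - i = ml) :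
    (∀ i j : Nat, i ≤ j → j ≤ a.length → pref a j - pref a i ≤ mc → (j : Int) - i ≤ loopA a mc ml asum pro pre)
    ∧ 0 ≤ loopA a mc ml asum pro pre
    ∧ (loopA a mc ml asum pro pre = 0 ∨ ∃ i j : Nat, i ≤ j ∧ j ≤ a.length ∧ pref a j - pref a i ≤ mc ∧ (j : Int) - i = loopA a mc ml asum pro pre) := by
  rw [loopA.eq_def]
  split_ifs with h h2 h3
  · -- extend the window
    have hps := pref_succ a pro
    refine loopA_spec a mc hnn ml (asum + a.getD pro 0) (pro + 1) pre
      (by omega) (by omega) (by omega) (Or.inr (by omega)) hml0 ?_ ?_ Hach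
    · intro i j hip hij hjp hf
      rcases Nat.lt_or_ge j (pro + 1) with hj | hj
      · exact H1 i j hip hij (by omega) hf
      · have hj' : j = pro + 1 := by omega
        subst hj'
        exact absurd hf (by have := H2 i hip h; omega)
    · intro i hip _
      have := H2 i hip h
      have := pref_mono a hnn (show pro + 1 ≤ pro + 1 + 1 by omega)
      omega
  · -- record and move the left end
    have hps := pref_succ a pre
    have hpro := pref_succ a pro
    have hmn := pref_mono a hnn (show pre ≤ pre + 1 by omega)
    have hfeas : pref a pro - pref a pre ≤ mc := by
      rcases hfw with he | hf
      · omega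
      · exact hf
    refine loopA_spec a mc hnn (max ml ((pro : Int) - (pre : Int))) (asum - a.getD pre 0) pro (pre + 1)
      (by omega) hpl (by omega) (Or.inr (by omega)) (le_trans hml0 (le_max_left _ _)) ?_ ?_ ?_
    · intro i j hip hij hjp hf
      by_cases hi : i < pre
      · exact le_trans (H1 i j hi hij hjp hf) (le_max_left _ _)
      · have : (j : Int) - i ≤ (pro : Int) - (pre : Int) := by omega
        exact le_trans this (le_max_right _ _)
    · intro i hip hplt
      by_cases hi : i < pre
      · exact H2 i hi hplt
      · have hi' : i = pre := by omega
        rw [hi']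
        omega
    · by_cases hc : ((pro : Int) - (pre : Int)) ≤ ml
      · rw [max_eq_left hc]; exact Hach
      · rw [max_eq_right (by omega : ml ≤ (pro : Int) - (pre : Int))]
        exact Or.inr ⟨pre, pro, by omega, hpl, hfeas, rfl⟩
  · -- empty window that cannot be extended: restart past it
    have hpe : pro = pre := by omega
    subst hpe
    have hml' : max ml ((pro : Int) - (pro : Int)) = ml := by
      have h0 : ((pro : Int) - (pro : Int)) = 0 := by omega
      rw [h0, max_eq_left hml0]
    rw [hml']
    have hps := pref_succ a pro
    refine loopA_spec a mc hnn ml 0 (pro + 1) (pro + 1)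
      (le_refl _) (by omega) (by omega) (Or.inl rfl) hml0 ?_ ?_ Hach
    · intro i j hip hij hjp hf
      by_cases hi : i < pro
      · rcases Nat.lt_or_ge j (pro + 1) with hj | hj
        · exact H1 i j hi hij (by omega) hf
        · have hj' : j = pro + 1 := by omega
          subst hj'
          exact absurd hf (by have := H2 i hi h; omega)
      · have hi' : i = pro := by omega
        rw [hi'] at hf
        rcases Nat.lt_or_ge j (pro + 1) with hj | hj
        · have : (j : Int) - i ≤ 0 := by omega
          omega
        · have hj' : j = pro + 1 := by omega
          subst hj'
          exact absurd hf (by omega)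
    · intro i hip _
      have hmn := pref_mono a hnn (show pro + 1 ≤ pro + 1 + 1 by omega)
      by_cases hi : i < pro
      · have := H2 i hi h
        omega
      · have hi' : i = pro := by omega
        rw [hi']
        omega
  · -- loop finished: pro = len
    have hpro : pro = a.length := by omega
    refine ⟨?_, le_trans hml0 (le_max_left _ _), ?_⟩
    · intro i j hij hjl hf
      by_cases hi : i < pre
      · exact le_trans (H1 i j hi hij (by omega) hf) (le_max_left _ _)
      · have : (j : Int) - i ≤ (pro : Int) - (pre : Int) := by omega
        exact le_trans this (le_max_right _ _)
    · by_cases hc : ((pro : Int) - (pre : Int)) ≤ ml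
      · rw [max_eq_left hc]; exact Hach
      · rw [max_eq_right (by omega : ml ≤ (pro : Int) - (pre : Int))]
        refine Or.inr ⟨pre, pro, hpp, by omega, ?_, rfl⟩
        rcases hfw with he | hfeas
        · exfalso; omega
        · exact hfeas
termination_by (a.length - pro) + (a.length - pre)
decreasing_by all_goals omega

-- characterisation of blLoop = bisect_left
theorem blLoop_spec (P : List Int) (x : Int)
    (hmono : ∀ i j : Nat, i ≤ j → j < P.length → P.getD i 0 ≤ P.getD j 0)
    (lo hi : Nat) (hhi : hi ≤ P.length) :
    (lo ≤ blLoop P x lo hi ∧ blLoop P x lo hi ≤ max lo hi)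
    ∧ (∀ i : Nat, lo ≤ i → i < blLoop P x lo hi → P.getD i 0 < x)
    ∧ (blLoop P x lo hi < hi → x ≤ P.getD (blLoop P x lo hi) 0) := by
  rw [blLoop.eq_def]
  split_ifs with h hb
  · have hmid : (lo + hi) / 2 < hi := by omega
    obtain ⟨⟨ih1, ih2⟩, ih3, ih4⟩ := blLoop_spec P x hmono ((lo + hi) / 2 + 1) hi hhi
    refine ⟨⟨by omega, by omega⟩, ?_, ih4⟩
    intro i hli hir
    by_cases hi2 : (lo + hi) / 2 + 1 ≤ i
    · exact ih3 i hi2 hir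
    · exact lt_of_le_of_lt (hmono i ((lo + hi) / 2) (by omega) (by omega)) hb
  · have hmid1 : lo ≤ (lo + hi) / 2 := by omega
    have hmid2 : (lo + hi) / 2 < hi := by omega
    obtain ⟨⟨ih1, ih2⟩, ih3, ih4⟩ := blLoop_spec P x hmono lo ((lo + hi) / 2) (by omega)
    refine ⟨⟨ih1, by omega⟩, ih3, ?_⟩
    intro _
    by_cases hr : blLoop P x lo ((lo + hi) / 2) < (lo + hi) / 2
    · exact ih4 hr
    · have heq : blLoop P x lo ((lo + hi) / 2) = (lo + hi) / 2 := by omega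
      rw [heq]
      omega
  · refine ⟨⟨le_refl _, le_max_left _ _⟩, ?_, ?_⟩
    · intro i h1 h2; omega
    · intro hlt; exact absurd hlt h
termination_by hi - lo
decreasing_by all_goals omega

-- buildP computes the prefix-sum table
theorem buildP_eq_generic (c : List Int) :
    c.foldl (fun P v => P ++ [P.getLastD 0 + v]) [0]
      = (List.range (c.length + 1)).map (fun k => pref c k) := by
  induction c using List.reverseRecOn with
  | nil => simp [pref]
  | append_singleton c v ih =>
    rw [List.foldl_append, ih]
    simp only [List.foldl_cons, List.foldl_nil]
    have hlast : ((List.range (c.length + 1)).map (fun k => pref c k)).getLastD 0 = pref c c.length := by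
      rw [List.range_succ, List.map_append]
      simp
    rw [hlast, show (c ++ [v]).length + 1 = (c.length + 1) + 1 by simp]
    conv_rhs => rw [List.range_succ]
    rw [List.map_append]
    congr 1
    · refine List.map_congr_left (fun k hk => ?_)
      rw [List.mem_range] at hk
      unfold pref
      rw [List.take_append_of_le_length (by omega)]
    · simp only [List.map_cons, List.map_nil]
      congr 1
      unfold pref
      rw [List.take_length, List.take_of_length_le (by simp), List.sum_append]
      simp

-- B's outer fold, named for the proofs (identical to the port's body)
def bFold (P : List Int) (mc : Int) (m : Nat) : Int :=
  (PySem.List.pyRange 1 ((m : Int) + 1) 1).foldl (fun best j =>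
    let x := PySem.List.pyGetD P j 0 - mc
    let lo := blLoop P x 0 j.toNat
    if PySem.List.pyGetD P j 0 - P.getD lo 0 ≤ mc ∧ j - (lo : Int) > best then j - (lo : Int)
    else best) 0

theorem buildP_eq (ps : List (Char × Char)) :
    buildP ps = (List.range ((ps.map (fun p => |((p.1.toNat : Int)) - ((p.2.toNat : Int))|)).length + 1)).map
      (fun k => pref (ps.map (fun p => |((p.1.toNat : Int)) - ((p.2.toNat : Int))|)) k) := by
  unfold buildP
  rw [← buildP_eq_generic, List.foldl_map]

theorem Pget (c : List Int) (k : Nat) (hk : k ≤ c.length) :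
    ((List.range (c.length + 1)).map (fun k => pref c k)).getD k 0 = pref c k := by
  rw [List.getD_eq_getElem _ _ (by simp; omega)]
  simp

theorem Pmono (c : List Int) (hnn : ∀ v ∈ c, 0 ≤ v) :
    ∀ i j : Nat, i ≤ j → j < ((List.range (c.length + 1)).map (fun k => pref c k)).length →
      ((List.range (c.length + 1)).map (fun k => pref c k)).getD i 0
        ≤ ((List.range (c.length + 1)).map (fun k => pref c k)).getD j 0 := by
  intro i j hij hj
  have hj' : j ≤ c.length := by simp at hj; omega
  rw [Pget c i (by omega), Pget c j hj']
  exact pref_mono c hnn hij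

theorem bFold_succ (P : List Int) (mc : Int) (m : Nat) :
    bFold P mc (m + 1) =
      (if PySem.List.pyGetD P ((m : Int) + 1) 0
            - P.getD (blLoop P (PySem.List.pyGetD P ((m : Int) + 1) 0 - mc) 0 (((m : Int) + 1).toNat)) 0 ≤ mc
          ∧ ((m : Int) + 1) - ((blLoop P (PySem.List.pyGetD P ((m : Int) + 1) 0 - mc) 0 (((m : Int) + 1).toNat) : Nat) : Int) > bFold P mc m
       then ((m : Int) + 1) - ((blLoop P (PySem.List.pyGetD P ((m : Int) + 1) 0 - mc) 0 (((m : Int) + 1).toNat) : Nat) : Int)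
       else bFold P mc m) := by
  unfold bFold
  rw [show ((m + 1 : Nat) : Int) + 1 = (((m : Int) + 1) + 1) by push_cast; ring]
  rw [PySem.List.pyRange_one_succ_right (by omega : (1 : Int) ≤ (m : Int) + 1)]
  rw [List.foldl_append]
  simp only [List.foldl_cons, List.foldl_nil]

theorem bFold_spec (c : List Int) (mc : Int) (hnn : ∀ v ∈ c, 0 ≤ v) (m : Nat) (hm : m ≤ c.length) :
    0 ≤ bFold ((List.range (c.length + 1)).map (fun k => pref c k)) mc m
    ∧ (∀ i j : Nat, i ≤ j → j ≤ m → pref c j - pref c i ≤ mc →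
        (j : Int) - i ≤ bFold ((List.range (c.length + 1)).map (fun k => pref c k)) mc m)
    ∧ (bFold ((List.range (c.length + 1)).map (fun k => pref c k)) mc m = 0
        ∨ ∃ i j : Nat, i ≤ j ∧ j ≤ c.length ∧ pref c j - pref c i ≤ mc
            ∧ (j : Int) - i = bFold ((List.range (c.length + 1)).map (fun k => pref c k)) mc m) := by
  induction m with
  | zero =>
    have h0 : bFold ((List.range (c.length + 1)).map (fun k => pref c k)) mc 0 = 0 := by
      unfold bFold
      rw [show (((0 : Nat) : Int) + 1) = 1 by norm_num, PySem.List.pyRange_one_eq_nil (le_refl 1)]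
      rfl
    rw [h0]
    refine ⟨le_refl _, ?_, Or.inl rfl⟩
    intro i j hij hj _
    omega
  | succ m ih =>
    obtain ⟨ih0, ih1, ih2⟩ := ih (by omega)
    rw [bFold_succ]
    have htn : (((m : Int) + 1)).toNat = m + 1 := by omega
    have hcast : ((m : Int) + 1) = ((m + 1 : Nat) : Int) := by push_cast; ring
    rw [htn, hcast, PySem.List.pyGetD_natCast, Pget c (m + 1) (by omega)]
    obtain ⟨⟨hlo1, hlo2⟩, hbelow, hat⟩ := blLoop_spec
      ((List.range (c.length + 1)).map (fun k => pref c k)) (pref c (m + 1) - mc)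
      (Pmono c hnn) 0 (m + 1) (by simp; omega)
    set r := blLoop ((List.range (c.length + 1)).map (fun k => pref c k)) (pref c (m + 1) - mc) 0 (m + 1) with hr
    have hrm : r ≤ m + 1 := by omega
    have hrlen : r ≤ c.length := by omega
    rw [Pget c r hrlen]
    -- infeasibility below r
    have hinf : ∀ i : Nat, i < r → ¬ (pref c (m + 1) - pref c i ≤ mc) := by
      intro i hi
      have := hbelow i (by omega) hi
      rw [Pget c i (by omega)] at this
      omega
    set F := bFold ((List.range (c.length + 1)).map (fun k => pref c k)) mc m with hF
    by_cases hg : pref c (m + 1) - pref c r ≤ mc ∧ ((m + 1 : Nat) : Int) - (r : Int) > F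
    · rw [if_pos hg]
      refine ⟨by omega, ?_, Or.inr ⟨r, m + 1, hrm, by omega, hg.1, rfl⟩⟩
      intro i j hij hj hf
      rcases Nat.lt_or_ge j (m + 1) with hjm | hjm
      · have := ih1 i j hij (by omega) hf
        omega
      · have hj' : j = m + 1 := by omega
        subst hj'
        have hir : r ≤ i := by
          by_contra hlt
          exact hinf i (by omega) hf
        omega
    · rw [if_neg hg]
      refine ⟨ih0, ?_, ih2⟩
      intro i j hij hj hf
      rcases Nat.lt_or_ge j (m + 1) with hjm | hjm
      · exact ih1 i j hij (by omega) hf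
      · have hj' : j = m + 1 := by omega
        subst hj'
        have hir : r ≤ i := by
          by_contra hlt
          exact hinf i (by omega) hf
        rcases Nat.lt_or_ge r (m + 1) with hrlt | hrge
        · have hx := hat hrlt
          rw [Pget c r hrlen] at hx
          have hfeasr : pref c (m + 1) - pref c r ≤ mc := by omega
          -- the guard failed, so (m+1) - r ≤ F already
          have : ¬ (((m + 1 : Nat) : Int) - (r : Int) > F) := by
            intro hgt
            exact hg ⟨hfeasr, hgt⟩
          omega
        · -- r = m + 1, so i = m + 1 and the window is empty
          have : i = m + 1 := by omega
          subst this
          omega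

-- A's list-building loop produces the cost list
theorem A_list_eq (s t : String) (hpre : s.toList.length ≤ t.toList.length) :
    (PySem.List.pyRange 0 (PySem.Str.len s) 1).foldl
      (fun acc i => acc ++ [ |((((PySem.Str.pyGet? s i).getD ' ').toNat : Int)) - ((((PySem.Str.pyGet? t i).getD ' ').toNat : Int))| ]) []
    = (s.toList.zip t.toList).map (fun p => |((p.1.toNat : Int)) - ((p.2.toNat : Int))|) := by
  rw [PySem.List.foldl_append_singleton_eq_map]
  have hsl : s.toList.length = s.length := String.length_toList
  have htl : t.toList.length = t.length := String.length_toList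
  apply List.ext_getElem
  · simp [PySem.List.length_pyRange_one]
    omega
  · intro k h1 h2
    simp only [List.nil_append, List.getElem_map, PySem.List.getElem_pyRange_one, List.getElem_zip]
    have hk : k < s.toList.length := by
      simp [PySem.List.length_pyRange_one] at h1
      omega
    have hkt : k < t.toList.length := by omega
    simp [PySem.Str.pyGet?_eq, PySem.List.pyGet?_natCast, List.getElem?_eq_getElem hk,
      List.getElem?_eq_getElem hkt]

theorem equalSubstring_spec : Claim_equal_equalSubstring := by
  intro s t mc _hdom hpre
  unfold Spec_equalSubstring
  unfold Pre_equalSubstring at hpre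
  set c := (s.toList.zip t.toList).map (fun p => |((p.1.toNat : Int)) - ((p.2.toNat : Int))|) with hcdef
  have hnn : ∀ v ∈ c, 0 ≤ v := by
    intro v hv
    rw [hcdef] at hv
    obtain ⟨p, _, hp⟩ := List.mem_map.mp hv
    rw [← hp]
    exact abs_nonneg _
  -- A side
  have hA : equalSubstring s t mc = loopA c mc 0 0 0 0 := by
    simp only [equalSubstring]
    rw [A_list_eq s t hpre]
  -- B side
  have hPb : buildP (s.toList.zip t.toList) = (List.range (c.length + 1)).map (fun k => pref c k) :=
    buildP_eq _
  have hB : equalSubstring_alt s t mc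
      = bFold (buildP (s.toList.zip t.toList)) mc ((buildP (s.toList.zip t.toList)).length - 1) := rfl
  have hlen : ((List.range (c.length + 1)).map (fun k => pref c k)).length - 1 = c.length := by simp
  rw [hA, hB, hPb, hlen]
  obtain ⟨bA, nA, aA⟩ := loopA_spec c mc hnn 0 0 0 0 (le_refl 0) (by omega) (by omega)
    (Or.inl rfl) (le_refl 0) (by intro i j hi; omega) (by intro i hi; omega) (Or.inl rfl)
  obtain ⟨nB, bB, aB⟩ := bFold_spec c mc hnn c.length (le_refl _)
  apply le_antisymm
  · rcases aA with h0 | ⟨i, j, hij, hjl, hf, he⟩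
    · rw [h0]; exact nB
    · rw [← he]; exact bB i j hij hjl hf
  · rcases aB with h0 | ⟨i, j, hij, hjl, hf, he⟩
    · rw [h0]; exact nA
    · rw [← he]; exact bA i j hij hjl hf
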